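-- pv_equiv track=rewrite | github.com/OZTaekOppa/FastaHandler | scripts/asm_stats_unlimit.py | calculate_length_ranges
-- ===== SOURCE A (Python) =====
-- def calculate_length_ranges(lengths):
--     bins = [200, 1000, 5000, 10000, 50000, 100000, 500000, 1000000, 5000000]
--     ranges = {f"{b}bp": 0 for b in bins}
--     ranges["Over10Mbp"] = 0
--     for length in lengths:
--         for b in bins:
--             if length < b:
--                 ranges[f"{b}bp"] += 1
--                 break
--         else:
--             ranges["Over10Mbp"] += 1
--     return ranges
-- ===== SOURCE B (Python) =====
-- def calculate_length_ranges(lengths):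
--     bins = [200, 1000, 5000, 10000, 50000, 100000, 500000, 1000000, 5000000]
--     labels = [f"{b}bp" for b in bins] + ["Over10Mbp"]
--     counts = {}
--     for n in lengths:
--         key = labels[sum(b <= n for b in bins)]
--         counts[key] = counts.get(key, 0) + 1
--     return {k: counts.get(k, 0) for k in labels}
-- ===== Notes on version B (the rewrite author's own statement) =====
-- stated objective: alternative
-- what changed: B replaces A's in-place for/else/break mutation of a pre-initialized dict by a counting pass that picks each length's label via a comparison-sum index (labels[sum(b <= n for b in bins)]) into a fresh counter dict, then assembles the result dict from the label list at the end.
import Mathlib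
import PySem

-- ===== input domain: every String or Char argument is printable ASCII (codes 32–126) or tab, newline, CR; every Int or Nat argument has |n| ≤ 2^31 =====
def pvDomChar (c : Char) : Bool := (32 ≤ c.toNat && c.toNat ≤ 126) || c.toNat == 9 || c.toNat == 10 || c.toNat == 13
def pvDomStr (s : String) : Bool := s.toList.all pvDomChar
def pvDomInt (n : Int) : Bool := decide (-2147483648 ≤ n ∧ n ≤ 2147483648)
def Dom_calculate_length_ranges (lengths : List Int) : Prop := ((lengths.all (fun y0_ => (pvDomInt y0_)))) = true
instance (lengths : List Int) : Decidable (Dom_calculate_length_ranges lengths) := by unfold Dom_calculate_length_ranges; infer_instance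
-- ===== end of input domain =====

-- B counts labels into a fresh counter dict (key = labels[sum(b <= n for b in bins)],
-- a comparison-sum index instead of A's for/else/break scan that mutates a
-- pre-initialized dict in place) and assembles the result dict at the end (idiomatic).

-- ===== PORT A =====
-- f"{b}bp"
def pvKeyA (b : Int) : String := PySem.Int.toStr b ++ "bp"

def pvBinsA : List Int := [200, 1000, 5000, 10000, 50000, 100000, 500000, 1000000, 5000000]

-- inner 'for b in bins: … break / else:' loop; ranges[key] += 1 is modify with
-- default 0 — exact here since every touched key is present in the dict.
def pvInnerA (d : PySem.Dict String Int) (length : Int) : List Int → PySem.Dict String Int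
  | [] => d.modify "Over10Mbp" 0 (· + 1)
  | b :: rest => if length < b then d.modify (pvKeyA b) 0 (· + 1) else pvInnerA d length rest

def calculate_length_ranges (lengths : List Int) : List (String × Int) :=
  let bins := pvBinsA
  let ranges := bins.foldl (fun d b => d.insert (pvKeyA b) 0) PySem.Dict.empty
  let ranges := ranges.insert "Over10Mbp" 0
  (lengths.foldl (fun d length => pvInnerA d length bins) ranges).items

-- ===== PORT B =====
def pvBinsB : List Int := [200, 1000, 5000, 10000, 50000, 100000, 500000, 1000000, 5000000]

-- labels = [f"{b}bp" for b in bins] + ["Over10Mbp"]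
def pvLabelsB : List String := pvBinsB.map (fun b => PySem.Int.toStr b ++ "bp") ++ ["Over10Mbp"]

-- labels[sum(b <= n for b in bins)] — sum of booleans is an int; the index is
-- always in 0..9 < len(labels), so pyGetD with a dummy default is exact here.
def pvKeyB (n : Int) : String :=
  PySem.List.pyGetD pvLabelsB ((pvBinsB.map (fun b => if b ≤ n then (1 : Int) else 0)).sum) ""

def calculate_length_ranges_alt (lengths : List Int) : List (String × Int) :=
  let counts := lengths.foldl
    (fun d n => let key := pvKeyB n; d.insert key (d.getD key 0 + 1)) PySem.Dict.empty
  -- {k: counts.get(k, 0) for k in labels}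
  (pvLabelsB.foldl (fun d k => d.insert k (counts.getD k 0)) PySem.Dict.empty).items

-- ===== PRECONDITION & SPEC =====
def Spec_calculate_length_ranges (lengths : List Int) (out : List (String × Int)) : Prop := out = calculate_length_ranges_alt lengths
instance (lengths : List Int) (out : List (String × Int)) : Decidable (Spec_calculate_length_ranges lengths out) := by unfold Spec_calculate_length_ranges; infer_instance

-- ===== CLAIM (what is proved, stated in full; the proofs are below) =====
def Claim_equal_calculate_length_ranges : Prop := ∀ (lengths : List Int), Dom_calculate_length_ranges lengths → Spec_calculate_length_ranges lengths (calculate_length_ranges lengths)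

-- ===== LEMMAS AND PROOFS =====

-- the ten keys, as literals
def pvL : List String :=
  ["200bp", "1000bp", "5000bp", "10000bp", "50000bp", "100000bp", "500000bp",
   "1000000bp", "5000000bp", "Over10Mbp"]

theorem pvLabelsB_eq : pvLabelsB = pvL := by decide

-- ranges[k] += 1 on a dict that contains k is an overwriting counting insert
theorem pv_modify_insert (d : PySem.Dict String Int) (k : String) :
    d.modify k 0 (· + 1) = d.insert k (d.getD k 0 + 1) := rfl

theorem pv_step_eq (d : PySem.Dict String Int) (n : Int) :
    pvInnerA d n pvBinsA = d.insert (pvKeyB n) (d.getD (pvKeyB n) 0 + 1) := by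
  by_cases h0 : n < 200
  · have hsum : ((pvBinsB.map (fun b => if b ≤ n then (1 : Int) else 0)).sum) = 0 := by
      simp only [pvBinsB, List.map_cons, List.map_nil, List.sum_cons, List.sum_nil]
      rw [if_neg (by omega : ¬((200:Int) ≤ n)), if_neg (by omega : ¬((1000:Int) ≤ n)), if_neg (by omega : ¬((5000:Int) ≤ n)), if_neg (by omega : ¬((10000:Int) ≤ n)), if_neg (by omega : ¬((50000:Int) ≤ n)), if_neg (by omega : ¬((100000:Int) ≤ n)), if_neg (by omega : ¬((500000:Int) ≤ n)), if_neg (by omega : ¬((1000000:Int) ≤ n)), if_neg (by omega : ¬((5000000:Int) ≤ n))]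
      norm_num
    have hkey : pvKeyB n = "200bp" := by rw [pvKeyB, hsum]; decide
    simp only [pvInnerA, pvBinsA, if_pos h0]
    rw [hkey, pv_modify_insert, (by decide : pvKeyA 200 = "200bp")]
  by_cases h1 : n < 1000
  · have hsum : ((pvBinsB.map (fun b => if b ≤ n then (1 : Int) else 0)).sum) = 1 := by
      simp only [pvBinsB, List.map_cons, List.map_nil, List.sum_cons, List.sum_nil]
      rw [if_pos (by omega : (200:Int) ≤ n), if_neg (by omega : ¬((1000:Int) ≤ n)), if_neg (by omega : ¬((5000:Int) ≤ n)), if_neg (by omega : ¬((10000:Int) ≤ n)), if_neg (by omega : ¬((50000:Int) ≤ n)), if_neg (by omega : ¬((100000:Int) ≤ n)), if_neg (by omega : ¬((500000:Int) ≤ n)), if_neg (by omega : ¬((1000000:Int) ≤ n)), if_neg (by omega : ¬((5000000:Int) ≤ n))]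
      norm_num
    have hkey : pvKeyB n = "1000bp" := by rw [pvKeyB, hsum]; decide
    simp only [pvInnerA, pvBinsA, if_neg h0, if_pos h1]
    rw [hkey, pv_modify_insert, (by decide : pvKeyA 1000 = "1000bp")]
  by_cases h2 : n < 5000
  · have hsum : ((pvBinsB.map (fun b => if b ≤ n then (1 : Int) else 0)).sum) = 2 := by
      simp only [pvBinsB, List.map_cons, List.map_nil, List.sum_cons, List.sum_nil]
      rw [if_pos (by omega : (200:Int) ≤ n), if_pos (by omega : (1000:Int) ≤ n), if_neg (by omega : ¬((5000:Int) ≤ n)), if_neg (by omega : ¬((10000:Int) ≤ n)), if_neg (by omega : ¬((50000:Int) ≤ n)), if_neg (by omega : ¬((100000:Int) ≤ n)), if_neg (by omega : ¬((500000:Int) ≤ n)), if_neg (by omega : ¬((1000000:Int) ≤ n)), if_neg (by omega : ¬((5000000:Int) ≤ n))]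
      norm_num
    have hkey : pvKeyB n = "5000bp" := by rw [pvKeyB, hsum]; decide
    simp only [pvInnerA, pvBinsA, if_neg h0, if_neg h1, if_pos h2]
    rw [hkey, pv_modify_insert, (by decide : pvKeyA 5000 = "5000bp")]
  by_cases h3 : n < 10000
  · have hsum : ((pvBinsB.map (fun b => if b ≤ n then (1 : Int) else 0)).sum) = 3 := by
      simp only [pvBinsB, List.map_cons, List.map_nil, List.sum_cons, List.sum_nil]
      rw [if_pos (by omega : (200:Int) ≤ n), if_pos (by omega : (1000:Int) ≤ n), if_pos (by omega : (5000:Int) ≤ n), if_neg (by omega : ¬((10000:Int) ≤ n)), if_neg (by omega : ¬((50000:Int) ≤ n)), if_neg (by omega : ¬((100000:Int) ≤ n)), if_neg (by omega : ¬((500000:Int) ≤ n)), if_neg (by omega : ¬((1000000:Int) ≤ n)), if_neg (by omega : ¬((5000000:Int) ≤ n))]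
      norm_num
    have hkey : pvKeyB n = "10000bp" := by rw [pvKeyB, hsum]; decide
    simp only [pvInnerA, pvBinsA, if_neg h0, if_neg h1, if_neg h2, if_pos h3]
    rw [hkey, pv_modify_insert, (by decide : pvKeyA 10000 = "10000bp")]
  by_cases h4 : n < 50000
  · have hsum : ((pvBinsB.map (fun b => if b ≤ n then (1 : Int) else 0)).sum) = 4 := by
      simp only [pvBinsB, List.map_cons, List.map_nil, List.sum_cons, List.sum_nil]
      rw [if_pos (by omega : (200:Int) ≤ n), if_pos (by omega : (1000:Int) ≤ n), if_pos (by omega : (5000:Int) ≤ n), if_pos (by omega : (10000:Int) ≤ n), if_neg (by omega : ¬((50000:Int) ≤ n)), if_neg (by omega : ¬((100000:Int) ≤ n)), if_neg (by omega : ¬((500000:Int) ≤ n)), if_neg (by omega : ¬((1000000:Int) ≤ n)), if_neg (by omega : ¬((5000000:Int) ≤ n))]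
      norm_num
    have hkey : pvKeyB n = "50000bp" := by rw [pvKeyB, hsum]; decide
    simp only [pvInnerA, pvBinsA, if_neg h0, if_neg h1, if_neg h2, if_neg h3, if_pos h4]
    rw [hkey, pv_modify_insert, (by decide : pvKeyA 50000 = "50000bp")]
  by_cases h5 : n < 100000
  · have hsum : ((pvBinsB.map (fun b => if b ≤ n then (1 : Int) else 0)).sum) = 5 := by
      simp only [pvBinsB, List.map_cons, List.map_nil, List.sum_cons, List.sum_nil]
      rw [if_pos (by omega : (200:Int) ≤ n), if_pos (by omega : (1000:Int) ≤ n), if_pos (by omega : (5000:Int) ≤ n), if_pos (by omega : (10000:Int) ≤ n), if_pos (by omega : (50000:Int) ≤ n), if_neg (by omega : ¬((100000:Int) ≤ n)), if_neg (by omega : ¬((500000:Int) ≤ n)), if_neg (by omega : ¬((1000000:Int) ≤ n)), if_neg (by omega : ¬((5000000:Int) ≤ n))]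
      norm_num
    have hkey : pvKeyB n = "100000bp" := by rw [pvKeyB, hsum]; decide
    simp only [pvInnerA, pvBinsA, if_neg h0, if_neg h1, if_neg h2, if_neg h3, if_neg h4, if_pos h5]
    rw [hkey, pv_modify_insert, (by decide : pvKeyA 100000 = "100000bp")]
  by_cases h6 : n < 500000
  · have hsum : ((pvBinsB.map (fun b => if b ≤ n then (1 : Int) else 0)).sum) = 6 := by
      simp only [pvBinsB, List.map_cons, List.map_nil, List.sum_cons, List.sum_nil]
      rw [if_pos (by omega : (200:Int) ≤ n), if_pos (by omega : (1000:Int) ≤ n), if_pos (by omega : (5000:Int) ≤ n), if_pos (by omega : (10000:Int) ≤ n), if_pos (by omega : (50000:Int) ≤ n), if_pos (by omega : (100000:Int) ≤ n), if_neg (by omega : ¬((500000:Int) ≤ n)), if_neg (by omega : ¬((1000000:Int) ≤ n)), if_neg (by omega : ¬((5000000:Int) ≤ n))]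
      norm_num
    have hkey : pvKeyB n = "500000bp" := by rw [pvKeyB, hsum]; decide
    simp only [pvInnerA, pvBinsA, if_neg h0, if_neg h1, if_neg h2, if_neg h3, if_neg h4, if_neg h5, if_pos h6]
    rw [hkey, pv_modify_insert, (by decide : pvKeyA 500000 = "500000bp")]
  by_cases h7 : n < 1000000
  · have hsum : ((pvBinsB.map (fun b => if b ≤ n then (1 : Int) else 0)).sum) = 7 := by
      simp only [pvBinsB, List.map_cons, List.map_nil, List.sum_cons, List.sum_nil]
      rw [if_pos (by omega : (200:Int) ≤ n), if_pos (by omega : (1000:Int) ≤ n), if_pos (by omega : (5000:Int) ≤ n), if_pos (by omega : (10000:Int) ≤ n), if_pos (by omega : (50000:Int) ≤ n), if_pos (by omega : (100000:Int) ≤ n), if_pos (by omega : (500000:Int) ≤ n), if_neg (by omega : ¬((1000000:Int) ≤ n)), if_neg (by omega : ¬((5000000:Int) ≤ n))]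
      norm_num
    have hkey : pvKeyB n = "1000000bp" := by rw [pvKeyB, hsum]; decide
    simp only [pvInnerA, pvBinsA, if_neg h0, if_neg h1, if_neg h2, if_neg h3, if_neg h4, if_neg h5, if_neg h6, if_pos h7]
    rw [hkey, pv_modify_insert, (by decide : pvKeyA 1000000 = "1000000bp")]
  by_cases h8 : n < 5000000
  · have hsum : ((pvBinsB.map (fun b => if b ≤ n then (1 : Int) else 0)).sum) = 8 := by
      simp only [pvBinsB, List.map_cons, List.map_nil, List.sum_cons, List.sum_nil]
      rw [if_pos (by omega : (200:Int) ≤ n), if_pos (by omega : (1000:Int) ≤ n), if_pos (by omega : (5000:Int) ≤ n), if_pos (by omega : (10000:Int) ≤ n), if_pos (by omega : (50000:Int) ≤ n), if_pos (by omega : (100000:Int) ≤ n), if_pos (by omega : (500000:Int) ≤ n), if_pos (by omega : (1000000:Int) ≤ n), if_neg (by omega : ¬((5000000:Int) ≤ n))]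
      norm_num
    have hkey : pvKeyB n = "5000000bp" := by rw [pvKeyB, hsum]; decide
    simp only [pvInnerA, pvBinsA, if_neg h0, if_neg h1, if_neg h2, if_neg h3, if_neg h4, if_neg h5, if_neg h6, if_neg h7, if_pos h8]
    rw [hkey, pv_modify_insert, (by decide : pvKeyA 5000000 = "5000000bp")]
  · have hsum : ((pvBinsB.map (fun b => if b ≤ n then (1 : Int) else 0)).sum) = 9 := by
      simp only [pvBinsB, List.map_cons, List.map_nil, List.sum_cons, List.sum_nil]
      rw [if_pos (by omega : (200:Int) ≤ n), if_pos (by omega : (1000:Int) ≤ n), if_pos (by omega : (5000:Int) ≤ n), if_pos (by omega : (10000:Int) ≤ n), if_pos (by omega : (50000:Int) ≤ n), if_pos (by omega : (100000:Int) ≤ n), if_pos (by omega : (500000:Int) ≤ n), if_pos (by omega : (1000000:Int) ≤ n), if_pos (by omega : (5000000:Int) ≤ n)]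
      norm_num
    have hkey : pvKeyB n = "Over10Mbp" := by rw [pvKeyB, hsum]; decide
    simp only [pvInnerA, pvBinsA, if_neg h0, if_neg h1, if_neg h2, if_neg h3, if_neg h4, if_neg h5, if_neg h6, if_neg h7, if_neg h8]
    rw [hkey, pv_modify_insert]


-- the comparison-sum index is within 0..len(bins)
theorem pv_sum_ind_bounds (l : List Int) (n : Int) :
    0 ≤ (l.map (fun b => if b ≤ n then (1 : Int) else 0)).sum ∧
      (l.map (fun b => if b ≤ n then (1 : Int) else 0)).sum ≤ l.length := by
  induction l with
  | nil => simp
  | cons b l ih => simp only [List.map_cons, List.sum_cons, List.length_cons]; split_ifs <;> push_cast <;> omega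

theorem pvKeyB_mem (n : Int) : pvKeyB n ∈ pvL := by
  obtain ⟨h0, h9⟩ := pv_sum_ind_bounds pvBinsB n
  rw [pvKeyB, pvLabelsB_eq]
  obtain ⟨m, hm⟩ := Int.eq_ofNat_of_zero_le h0
  have hm9 : m ≤ 9 := by rw [hm] at h9; simp [pvBinsB] at h9; omega
  rw [hm, PySem.List.pyGetD_natCast]
  interval_cases m <;> decide

-- items of the counting fold over a dict that holds exactly the keys pvL
theorem pv_fold_items (ks : List String) (hks : ∀ x ∈ ks, x ∈ pvL)
    (f : String → Int) (d : PySem.Dict String Int)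
    (hd : d.items = pvL.map (fun k => (k, f k))) :
    (ks.foldl (fun d x => d.insert x (d.getD x 0 + 1)) d).items
      = pvL.map (fun k => (k, f k + ks.count k)) := by
  induction ks generalizing f d with
  | nil => simpa using hd
  | cons x ks ih =>
    have hx : x ∈ pvL := hks x (by simp)
    have hkeys : d.keys = pvL := by
      show d.items.map Prod.fst = pvL
      rw [hd, List.map_map]
      have h1 : List.map (Prod.fst ∘ fun k => (k, f k)) pvL = List.map id pvL :=
        List.map_congr_left (fun a _ => rfl)
      rw [h1, List.map_id]
    have hnd : d.keys.Nodup := by rw [hkeys]; decide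
    have hcont : d.contains x = true := by
      rw [PySem.Dict.contains_iff_mem_keys, hkeys]; exact hx
    have hget : d.getD x 0 = f x :=
      PySem.Dict.getD_of_mem_items d (by rw [hd]; exact List.mem_map.mpr ⟨x, hx, rfl⟩) hnd 0
    have hd' : (d.insert x (d.getD x 0 + 1)).items
        = pvL.map (fun k => (k, if k = x then f k + 1 else f k)) := by
      rw [PySem.Dict.items_insert_of_contains d _ hcont, hd, List.map_map]
      refine List.map_congr_left ?_
      intro k hk
      by_cases hkx : k = x
      · subst hkx; simp [hget]
      · simp [hkx]
    rw [List.foldl_cons, ih (fun y hy => hks y (by simp [hy])) _ _ hd']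
    refine List.map_congr_left ?_
    intro k hk
    by_cases hkx : k = x
    · subst hkx; simp; ring
    · simp [hkx, Ne.symm hkx]

-- B's final dict-comprehension over the literal label list
theorem pv_assemble (c : PySem.Dict String Int) :
    (pvLabelsB.foldl (fun d k => d.insert k (c.getD k 0)) PySem.Dict.empty).items
      = pvL.map (fun k => (k, c.getD k 0)) := by
  rw [pvLabelsB_eq]
  simp [pvL, PySem.Dict.items_insert, PySem.Dict.contains_insert, PySem.Dict.empty]

-- ===== VERDICT (by name: the statement is the Claim_ definition above) =====
set_option maxHeartbeats 1000000 in
theorem calculate_length_ranges_spec : Claim_equal_calculate_length_ranges := by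
  intro lengths _
  unfold Spec_calculate_length_ranges calculate_length_ranges calculate_length_ranges_alt
  show (lengths.foldl (fun d length => pvInnerA d length pvBinsA)
          ((pvBinsA.foldl (fun d b => d.insert (pvKeyA b) 0) PySem.Dict.empty).insert "Over10Mbp" 0)).items
      = (pvLabelsB.foldl
          (fun d k => d.insert k
            ((lengths.foldl (fun d n => d.insert (pvKeyB n) (d.getD (pvKeyB n) 0 + 1))
                PySem.Dict.empty).getD k 0))
          PySem.Dict.empty).items
  have hfun : (fun (d : PySem.Dict String Int) n => pvInnerA d n pvBinsA)
      = fun d n => d.insert (pvKeyB n) (d.getD (pvKeyB n) 0 + 1) := by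
    funext d n; exact pv_step_eq d n
  rw [hfun]
  have hmap : ∀ (d0 : PySem.Dict String Int),
      lengths.foldl (fun d n => d.insert (pvKeyB n) (d.getD (pvKeyB n) 0 + 1)) d0
        = (lengths.map pvKeyB).foldl (fun d x => d.insert x (d.getD x 0 + 1)) d0 :=
    fun d0 => Eq.symm List.foldl_map
  rw [hmap]
  rw [pv_fold_items (lengths.map pvKeyB)
        (fun x hx => by obtain ⟨n, _, rfl⟩ := List.mem_map.mp hx; exact pvKeyB_mem n)
        (fun _ => 0) _ (by decide)]
  rw [pv_assemble]
  refine List.map_congr_left ?_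
  intro k hk
  rw [hmap]
  simp [PySem.Dict.getD_foldl_insert_add_one]
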